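-- pv_equiv track=rewrite | github.com/RD8986/Python-Classes | August_Classes/HI_Tech_Request/28.08.2024/SRC/task.py | generate_random_string
-- ===== SOURCE A (Python) =====
-- def generate_random_string(seed):
--     characters = '0123456789ABCDEFGHIJKLMNOPQRSTUVWXYZabcdefghijklmnopqrstuvwxyz~!@#$%^&*()))_+'
--     length = (seed % 6) + 11
--
--     result = ''
--     for i in range(length):
--         seed = seed + (i * 7)
--         index = seed % len(characters)
--         result += characters[index]
--
--     return result
-- ===== SOURCE B (Python) =====
-- def generate_random_string(seed):
--     characters = '0123456789ABCDEFGHIJKLMNOPQRSTUVWXYZabcdefghijklmnopqrstuvwxyz~!@#$%^&*()))_+'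
--     length = (seed % 6) + 11
--     # closed form: the accumulated seed at position i is seed + 7*(0+1+...+i) = seed + 7*i*(i+1)//2
--     return ''.join(characters[(seed + 7 * i * (i + 1) // 2) % len(characters)] for i in range(length))
-- ===== Notes on version B (the rewrite author's own statement) =====
-- stated objective: simpler
-- what changed: Replaces the mutable seed accumulator loop with a single join over a closed-form index seed + 7*i*(i+1)//2 per position.
import Mathlib
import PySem

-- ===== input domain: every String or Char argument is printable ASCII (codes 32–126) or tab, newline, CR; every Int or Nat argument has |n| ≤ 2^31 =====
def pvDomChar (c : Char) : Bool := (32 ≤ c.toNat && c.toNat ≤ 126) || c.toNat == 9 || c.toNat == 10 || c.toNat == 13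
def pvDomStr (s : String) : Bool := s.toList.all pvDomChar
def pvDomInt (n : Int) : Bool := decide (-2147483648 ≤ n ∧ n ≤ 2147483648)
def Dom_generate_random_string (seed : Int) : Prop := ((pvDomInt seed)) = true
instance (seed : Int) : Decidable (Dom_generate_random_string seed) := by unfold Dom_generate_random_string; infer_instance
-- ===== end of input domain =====

-- B replaces A's running seed accumulator with a closed-form index per position (simpler decomposition, same cost).

-- ===== PORT A =====
-- characters table of A (the 77-character string literal)
def pvCharsA : List Char :=
  "0123456789ABCDEFGHIJKLMNOPQRSTUVWXYZabcdefghijklmnopqrstuvwxyz~!@#$%^&*()))_+".toList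

-- literal port of A: loop over range(length) carrying (seed, result);
-- characters[index] is ported as pyGetD (index = seed % 77 is always in range, so this is exact)
def generate_random_string (seed : Int) : String :=
  let characters := pvCharsA
  let length := PySem.Int.mod seed 6 + 11
  let st := (PySem.List.pyRange 0 length 1).foldl
    (fun (st : Int × List Char) i =>
      let s := st.1 + i * 7
      let index := PySem.Int.mod s (characters.length : Int)
      (s, st.2 ++ [PySem.List.pyGetD characters index ' '])) (seed, [])
  String.ofList st.2

-- ===== PORT B =====
def pvCharsB : List Char :=
  "0123456789ABCDEFGHIJKLMNOPQRSTUVWXYZabcdefghijklmnopqrstuvwxyz~!@#$%^&*()))_+".toList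

-- literal port of B: ''.join(characters[(seed + 7*i*(i+1)//2) % 77] for i in range(length))
def generate_random_string_alt (seed : Int) : String :=
  let characters := pvCharsB
  let length := PySem.Int.mod seed 6 + 11
  String.ofList ((PySem.List.pyRange 0 length 1).map
    (fun i => PySem.List.pyGetD characters
      (PySem.Int.mod (seed + PySem.Int.floordiv (7 * i * (i + 1)) 2) (characters.length : Int)) ' '))

-- ===== PRECONDITION & SPEC =====
def Spec_generate_random_string (seed : Int) (out : String) : Prop := out = generate_random_string_alt seed
instance (seed : Int) (out : String) : Decidable (Spec_generate_random_string seed out) := by unfold Spec_generate_random_string; infer_instance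

-- ===== CLAIM (what is proved, stated in full; the proofs are below) =====
def Claim_equal_generate_random_string : Prop := ∀ (seed : Int), Dom_generate_random_string seed → Spec_generate_random_string seed (generate_random_string seed)

-- ===== LEMMAS AND PROOFS =====

-- triangular numbers: pvT n = 0 + 1 + ... + (n-1)
def pvT : Nat → Int
  | 0 => 0
  | n + 1 => pvT n + n

lemma pvT_two_mul (n : Nat) : 2 * pvT (n + 1) = (n : Int) * (n + 1) := by
  induction n with
  | zero => simp [pvT]
  | succ k ih =>
    show 2 * (pvT (k + 1) + ((k : Int) + 1)) = _
    push_cast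
    linarith

lemma pvB_index (seed : Int) (k : Nat) :
    seed + PySem.Int.floordiv (7 * (k : Int) * ((k : Int) + 1)) 2 = seed + 7 * pvT (k + 1) := by
  have h : 7 * (k : Int) * ((k : Int) + 1) = 2 * (7 * pvT (k + 1)) := by
    have := pvT_two_mul k; linarith
  rw [h, PySem.Int.floordiv_eq_ediv_of_pos (by norm_num), Int.mul_ediv_cancel_left _ (by norm_num)]

-- the loop invariant of A: after folding over 0..n-1 the carried seed is seed + 7 * pvT n
-- and the k-th appended character is indexed by seed + 7 * pvT (k+1)
lemma pvLoopA (seed : Int) (n : Nat) (acc : List Char) :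
    List.foldl
      (fun (st : Int × List Char) i =>
        (st.1 + i * 7, st.2 ++ [PySem.List.pyGetD pvCharsA (PySem.Int.mod (st.1 + i * 7) 77) ' ']))
      (seed, acc) (List.map (fun (k : Nat) => (k : Int)) (List.range n))
    = (seed + 7 * pvT n,
       acc ++ (List.range n).map
         (fun k => PySem.List.pyGetD pvCharsA (PySem.Int.mod (seed + 7 * pvT (k + 1)) 77) ' ')) := by
  induction n generalizing acc with
  | zero => simp [pvT]
  | succ m ih =>
    rw [List.range_succ, List.map_append, List.foldl_append, ih, List.map_append]
    simp only [List.map_cons, List.map_nil, List.foldl_cons, List.foldl_nil]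
    have hs : seed + 7 * pvT m + (m : Int) * 7 = seed + 7 * pvT (m + 1) := by
      show _ = seed + 7 * (pvT m + (m : Int)); ring
    rw [hs]
    simp [List.append_assoc]

lemma pvCharsA_len : (pvCharsA.length : Int) = 77 := by decide
lemma pvCharsB_eq : pvCharsB = pvCharsA := rfl

lemma pvLen_nonneg (seed : Int) : ∃ n : Nat, PySem.Int.mod seed 6 + 11 = (n : Int) := by
  have h1 := PySem.Int.mod_nonneg seed (b := 6) (by norm_num)
  exact ⟨(PySem.Int.mod seed 6 + 11).toNat, by omega⟩

-- ===== VERDICT (by name: the statement is the Claim_ definition above) =====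
theorem generate_random_string_spec : Claim_equal_generate_random_string := by
  intro seed _
  show generate_random_string seed = generate_random_string_alt seed
  obtain ⟨n, hn⟩ := pvLen_nonneg seed
  simp only [generate_random_string, generate_random_string_alt, pvCharsB_eq, pvCharsA_len, hn,
    PySem.List.pyRange_zero_natCast]
  rw [pvLoopA seed n []]
  simp only [List.nil_append, List.map_map]
  congr 1
  apply List.map_congr_left
  intro k _
  simp only [Function.comp_apply]
  rw [pvB_index seed k]
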